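-- pv_equiv track=rewrite | github.com/htl-stp-ecer/raccoon-cli | raccoon_cli/git_history.py | _build_change_summary
-- ===== SOURCE A (Python) =====
-- def _build_change_summary(changes: list[tuple[str, str]]) -> str:
--     added = sum(1 for status, _ in changes if status == "A")
--     modified = sum(1 for status, _ in changes if status == "M")
--     deleted = sum(1 for status, _ in changes if status == "D")
--     other = len(changes) - added - modified - deleted
--
--     summary = f"{len(changes)} files (+{added} ~{modified} -{deleted}"
--     if other:
--         summary += f" ?{other}"
--     return summary + ")"
-- ===== SOURCE B (Python) =====
-- _SLOT = {"A": 0, "M": 1, "D": 2}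
--
-- def _build_change_summary(changes: list[tuple[str, str]]) -> str:
--     counts = [0, 0, 0]
--     for status, _ in changes:
--         slot = _SLOT.get(status)
--         if slot is not None:
--             counts[slot] += 1
--     added, modified, deleted = counts
--     other = len(changes) - added - modified - deleted
--
--     summary = f"{len(changes)} files (+{added} ~{modified} -{deleted}"
--     if other:
--         summary += f" ?{other}"
--     return summary + ")"
-- ===== Notes on version B (the rewrite author's own statement) =====
-- stated objective: alternative
-- what changed: Replaces A's three separate generator scans with a single explicit loop that table-dispatches each status through a slot dict into a 3-cell count array, then unpacks the array; only the counting strategy changes, the formatting tail is identical.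
import Mathlib
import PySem

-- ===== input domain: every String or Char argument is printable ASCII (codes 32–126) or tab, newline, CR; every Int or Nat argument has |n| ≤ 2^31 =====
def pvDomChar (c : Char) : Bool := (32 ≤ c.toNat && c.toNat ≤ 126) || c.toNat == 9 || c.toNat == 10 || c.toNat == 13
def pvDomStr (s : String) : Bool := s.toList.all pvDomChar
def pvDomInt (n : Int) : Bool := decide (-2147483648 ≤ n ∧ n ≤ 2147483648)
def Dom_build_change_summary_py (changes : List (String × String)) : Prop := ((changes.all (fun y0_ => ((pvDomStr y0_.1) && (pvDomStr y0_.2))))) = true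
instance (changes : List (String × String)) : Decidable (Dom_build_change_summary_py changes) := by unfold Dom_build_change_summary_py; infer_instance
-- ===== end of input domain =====

-- B replaces A's three generator scans with one explicit loop dispatching each status
-- through a slot table into a 3-cell count array (alternative decomposition; same output).

-- ===== PORT A =====
def build_change_summary_py (changes : List (String × String)) : String :=
  let added : Int := changes.foldl (fun acc p => if p.1 == "A" then acc + 1 else acc) 0
  let modified : Int := changes.foldl (fun acc p => if p.1 == "M" then acc + 1 else acc) 0
  let deleted : Int := changes.foldl (fun acc p => if p.1 == "D" then acc + 1 else acc) 0
  let other : Int := (changes.length : Int) - added - modified - deleted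
  let summary := PySem.Int.toStr (changes.length : Int) ++ " files (+" ++ PySem.Int.toStr added
      ++ " ~" ++ PySem.Int.toStr modified ++ " -" ++ PySem.Int.toStr deleted
  let summary := if other == 0 then summary else summary ++ " ?" ++ PySem.Int.toStr other
  summary ++ ")"

-- ===== PORT B =====
-- the module-level literal dict _SLOT = {"A": 0, "M": 1, "D": 2}
def pvSlot : PySem.Dict String Int := PySem.Dict.mk [("A", 0), ("M", 1), ("D", 2)]

def build_change_summary_py_alt (changes : List (String × String)) : String :=
  let counts : List Int := changes.foldl
    (fun counts p =>
      match pvSlot.get? p.1 with            -- slot = _SLOT.get(status)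
      | some slot => PySem.List.pySetD counts slot (PySem.List.pyGetD counts slot 0 + 1)  -- counts[slot] += 1 (slot always 0..2, in range)
      | none => counts)
    [0, 0, 0]
  -- added, modified, deleted = counts  (counts always has length 3)
  let added := PySem.List.pyGetD counts 0 0
  let modified := PySem.List.pyGetD counts 1 0
  let deleted := PySem.List.pyGetD counts 2 0
  let other : Int := (changes.length : Int) - added - modified - deleted
  let summary := PySem.Int.toStr (changes.length : Int) ++ " files (+" ++ PySem.Int.toStr added
      ++ " ~" ++ PySem.Int.toStr modified ++ " -" ++ PySem.Int.toStr deleted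
  let summary := if other == 0 then summary else summary ++ " ?" ++ PySem.Int.toStr other
  summary ++ ")"

-- ===== PRECONDITION & SPEC =====
def Spec_build_change_summary_py (changes : List (String × String)) (out : String) : Prop := out = build_change_summary_py_alt changes
instance (changes : List (String × String)) (out : String) : Decidable (Spec_build_change_summary_py changes out) := by unfold Spec_build_change_summary_py; infer_instance

-- ===== CLAIM (what is proved, stated in full; the proofs are below) =====
def Claim_equal_build_change_summary_py : Prop := ∀ (changes : List (String × String)), Dom_build_change_summary_py changes → Spec_build_change_summary_py changes (build_change_summary_py changes)

-- ===== LEMMAS AND PROOFS =====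

-- A's conditional-sum fold over the pairs counts the occurrences of s among the first components.
theorem foldl_count_status (s : String) (changes : List (String × String)) (n : Int) :
    changes.foldl (fun acc p => if p.1 == s then acc + 1 else acc) n
      = n + ((changes.map Prod.fst).count s : Int) := by
  induction changes generalizing n with
  | nil => simp [List.count]
  | cons hd tl ih =>
    simp only [List.foldl_cons, List.map_cons, List.count_cons, ih]
    by_cases h : hd.1 == s <;> (simp [h]; try ring)

-- B's single table-dispatch loop maintains exactly the three per-status counts.
theorem foldl_slots (changes : List (String × String)) (a m d : Int) :
    changes.foldl
      (fun counts p =>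
        match pvSlot.get? p.1 with
        | some slot => PySem.List.pySetD counts slot (PySem.List.pyGetD counts slot 0 + 1)
        | none => counts)
      [a, m, d]
      = [a + ((changes.map Prod.fst).count "A" : Int),
         m + ((changes.map Prod.fst).count "M" : Int),
         d + ((changes.map Prod.fst).count "D" : Int)] := by
  induction changes generalizing a m d with
  | nil => simp [List.count]
  | cons hd tl ih =>
    simp only [List.foldl_cons, List.map_cons, List.count_cons]
    by_cases hA : hd.1 = "A"
    · rw [show (match pvSlot.get? hd.1 with
          | some slot => PySem.List.pySetD [a, m, d] slot (PySem.List.pyGetD [a, m, d] slot 0 + 1)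
          | none => [a, m, d]) = [a + 1, m, d] by
        simp [pvSlot, PySem.Dict.get?_mk_cons, hA, PySem.List.pySetD, PySem.List.pyGetD,
          PySem.List.pySet?, PySem.List.pyIdx?, PySem.List.pyGet?], ih]
      simp [hA]; ring
    · by_cases hM : hd.1 = "M"
      · rw [show (match pvSlot.get? hd.1 with
            | some slot => PySem.List.pySetD [a, m, d] slot (PySem.List.pyGetD [a, m, d] slot 0 + 1)
            | none => [a, m, d]) = [a, m + 1, d] by
          simp [pvSlot, PySem.Dict.get?_mk_cons, hM, PySem.List.pySetD, PySem.List.pyGetD,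
            PySem.List.pySet?, PySem.List.pyIdx?, PySem.List.pyGet?], ih]
        simp [hM]; ring
      · by_cases hD : hd.1 = "D"
        · rw [show (match pvSlot.get? hd.1 with
              | some slot => PySem.List.pySetD [a, m, d] slot (PySem.List.pyGetD [a, m, d] slot 0 + 1)
              | none => [a, m, d]) = [a, m, d + 1] by
            simp [pvSlot, PySem.Dict.get?_mk_cons, hD, PySem.List.pySetD, PySem.List.pyGetD,
              PySem.List.pySet?, PySem.List.pyIdx?, PySem.List.pyGet?], ih]
          simp [hD]; ring
        · rw [show (match pvSlot.get? hd.1 with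
              | some slot => PySem.List.pySetD [a, m, d] slot (PySem.List.pyGetD [a, m, d] slot 0 + 1)
              | none => [a, m, d]) = [a, m, d] by
            simp [pvSlot, PySem.Dict.get?,
              Ne.symm hA, Ne.symm hM, Ne.symm hD], ih]
          simp [hA, hM, hD]

-- ===== VERDICT (by name: the statement is the Claim_ definition above) =====
theorem build_change_summary_py_spec : Claim_equal_build_change_summary_py := by
  intro changes _
  show build_change_summary_py changes = build_change_summary_py_alt changes
  simp only [build_change_summary_py, build_change_summary_py_alt,
    foldl_slots, foldl_count_status, zero_add]
  simp [PySem.List.pyGetD, PySem.List.pyIdx?, PySem.List.pyGet?]
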